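-- pv_equiv track=rewrite | github.com/JacobAMason/DnD | ZoneBuilder.py | build
-- ===== SOURCE A (Python) =====
-- def build(xaxis, yaxis, zaxis):
--     """
--     Generates the base room numbers
--     """
--     matrix = []
--     for floor in range(zaxis):
--         roomnum = 1
--         matrix.append([])
--         for row in range(yaxis):
--             matrix[floor].append([])
--             for column in range(xaxis):
--                 matrix[floor][row].append(str(roomnum))
--                 roomnum += 1
--     return matrix
-- ===== SOURCE B (Python) =====
-- def build(xaxis, yaxis, zaxis):
--     """
--     Generates the base room numbers
--     """
--     # Every floor is identical (the counter resets per floor), so build one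
--     # floor template with the closed form row*xaxis + column + 1, then
--     # replicate it with deep copies so no rows/floors are aliased.
--     if zaxis <= 0:
--         return []
--     template = [[str(row * xaxis + column + 1) for column in range(xaxis)]
--                 for row in range(yaxis)]
--     return [[row[:] for row in template] for _ in range(zaxis)]
-- ===== Notes on version B (the rewrite author's own statement) =====
-- stated objective: simpler
-- what changed: Replaces the triple nested loop with a running counter by a closed-form one-floor template (str(row*xaxis+column+1)) built once and deep-copied for each of the zaxis floors.
import Mathlib
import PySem

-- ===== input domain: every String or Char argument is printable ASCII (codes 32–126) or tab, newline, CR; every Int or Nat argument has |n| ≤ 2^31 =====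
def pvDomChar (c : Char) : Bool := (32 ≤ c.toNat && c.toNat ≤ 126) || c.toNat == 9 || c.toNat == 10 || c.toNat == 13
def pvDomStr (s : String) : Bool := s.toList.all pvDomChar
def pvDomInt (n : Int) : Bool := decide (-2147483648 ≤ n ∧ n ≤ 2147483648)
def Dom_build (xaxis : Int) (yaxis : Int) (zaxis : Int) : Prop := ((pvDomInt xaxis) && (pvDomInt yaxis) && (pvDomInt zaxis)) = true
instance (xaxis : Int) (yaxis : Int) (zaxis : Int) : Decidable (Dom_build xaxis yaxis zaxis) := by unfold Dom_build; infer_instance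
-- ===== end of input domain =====

-- B builds one closed-form floor template and replicates it per floor, instead of A's triple loop with a running counter; objective: simpler.


-- ===== PORT A =====
-- Each loop is a foldl over its range; the state is exactly what Python mutates:
-- the column loop carries (current row, roomnum); the row loop carries (current floor, roomnum);
-- the floor loop carries the matrix (roomnum is reset to 1 at the top of each floor).
def build (xaxis : Int) (yaxis : Int) (zaxis : Int) : List (List (List String)) :=
  (PySem.List.pyRange 0 zaxis 1).foldl (fun matrix _floor =>
    let fr :=
      (PySem.List.pyRange 0 yaxis 1).foldl (fun (p : List (List String) × Int) _row =>
        let q :=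
          (PySem.List.pyRange 0 xaxis 1).foldl (fun (r : List String × Int) _column =>
            (r.1 ++ [PySem.Int.toStr r.2], r.2 + 1)) ([], p.2)
        (p.1 ++ [q.1], q.2)) ([], 1)
    matrix ++ [fr.1]) []

-- ===== PORT B =====
def build_alt (xaxis : Int) (yaxis : Int) (zaxis : Int) : List (List (List String)) :=
  if zaxis ≤ 0 then [] else
  let template :=
    (PySem.List.pyRange 0 yaxis 1).map (fun row =>
      (PySem.List.pyRange 0 xaxis 1).map (fun column =>
        PySem.Int.toStr (row * xaxis + column + 1)))
  (PySem.List.pyRange 0 zaxis 1).map (fun _ => template.map (fun row => row))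

-- ===== PRECONDITION & SPEC =====
def Spec_build (xaxis : Int) (yaxis : Int) (zaxis : Int) (out : List (List (List String))) : Prop := out = build_alt xaxis yaxis zaxis
instance (xaxis : Int) (yaxis : Int) (zaxis : Int) (out : List (List (List String))) : Decidable (Spec_build xaxis yaxis zaxis out) := by unfold Spec_build; infer_instance

-- ===== CLAIM (what is proved, stated in full; the proofs are below) =====
def Claim_equal_build : Prop := ∀ (xaxis : Int) (yaxis : Int) (zaxis : Int), Dom_build xaxis yaxis zaxis → Spec_build xaxis yaxis zaxis (build xaxis yaxis zaxis)

-- ===== LEMMAS AND PROOFS =====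

-- column loop: appending str(roomnum) l.length times
theorem build_col (l : List Int) (acc : List String) (rn : Int) :
    l.foldl (fun (r : List String × Int) _ => (r.1 ++ [PySem.Int.toStr r.2], r.2 + 1)) (acc, rn)
      = (acc ++ (List.range l.length).map (fun c : Nat => PySem.Int.toStr (rn + (c : Int))),
          rn + l.length) := by
  induction l generalizing acc rn with
  | nil => simp
  | cons a t ih =>
      simp only [List.foldl_cons, ih, List.length_cons, List.range_succ_eq_map,
        List.map_cons, List.map_map, Nat.cast_zero, add_zero, List.append_assoc,
        List.singleton_append]
      refine Prod.ext ?_ (by push_cast; ring)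
      have hm : List.map (fun c : Nat => PySem.Int.toStr (rn + 1 + (c : Int))) (List.range t.length)
          = List.map ((fun c : Nat => PySem.Int.toStr (rn + (c : Int))) ∘ Nat.succ) (List.range t.length) := by
        apply List.map_congr_left
        intro c _
        simp only [Function.comp_apply]
        congr 1
        push_cast; ring
      rw [hm]

-- row loop: each iteration appends one block g(roomnum) and advances roomnum by X
theorem build_row (l : List Int) (X : Int) (g : Int → List String)
    (acc : List (List String)) (rn : Int) :
    l.foldl (fun (p : List (List String) × Int) _ => (p.1 ++ [g p.2], p.2 + X)) (acc, rn)
      = (acc ++ (List.range l.length).map (fun r : Nat => g (rn + (r : Int) * X)),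
          rn + l.length * X) := by
  induction l generalizing acc rn with
  | nil => simp
  | cons a t ih =>
      simp only [List.foldl_cons, ih, List.length_cons, List.range_succ_eq_map,
        List.map_cons, List.map_map, Nat.cast_zero, zero_mul, add_zero, List.append_assoc,
        List.singleton_append]
      refine Prod.ext ?_ (by push_cast; ring)
      have hm : List.map (fun r : Nat => g (rn + X + (r : Int) * X)) (List.range t.length)
          = List.map ((fun r : Nat => g (rn + (r : Int) * X)) ∘ Nat.succ) (List.range t.length) := by
        apply List.map_congr_left
        intro r _
        simp only [Function.comp_apply]
        congr 1
        push_cast; ring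
      rw [hm]

-- floor loop appends the same floor each time
theorem build_floor (l : List Int) (F : List (List String)) (acc : List (List (List String))) :
    l.foldl (fun m _ => m ++ [F]) acc = acc ++ List.replicate l.length F := by
  induction l generalizing acc with
  | nil => simp
  | cons a t ih => simp [ih, List.replicate_succ, List.append_assoc]

theorem build_spec_aux (xaxis yaxis zaxis : Int) :
    build xaxis yaxis zaxis = build_alt xaxis yaxis zaxis := by
  unfold build build_alt
  by_cases hz : zaxis ≤ 0
  · rw [if_pos hz, PySem.List.pyRange_one_eq_nil hz, List.foldl_nil]
  rw [if_neg hz]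
  simp only [build_col, List.nil_append]
  simp only [build_row (PySem.List.pyRange 0 yaxis)
      ((PySem.List.pyRange 0 xaxis).length : Int)
      (fun v => (List.range (PySem.List.pyRange 0 xaxis).length).map
        (fun c : Nat => PySem.Int.toStr (v + (c : Int)))),
    List.nil_append]
  rw [build_floor]
  simp only [List.map_id_fun', id_eq, List.map_const', List.nil_append,
    PySem.List.length_pyRange_one]
  congr 1
  rw [PySem.List.pyRange_one 0 yaxis, PySem.List.pyRange_one 0 xaxis]
  simp only [List.map_map, List.length_map, List.length_range]
  apply List.map_congr_left
  intro r _
  simp only [Function.comp_apply]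
  apply List.map_congr_left
  intro c hc
  simp only [Function.comp_apply]
  have hx : 0 < xaxis := by
    have := List.mem_range.mp hc
    omega
  congr 1
  have hlen : (((xaxis - 0).toNat : Nat) : Int) = xaxis := by omega
  rw [hlen]
  ring

-- ===== VERDICT (by name: the statement is the Claim_ definition above) =====
theorem build_spec : Claim_equal_build := by
  intro x y z _
  unfold Spec_build
  exact build_spec_aux x y z
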